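-- pv_equiv track=rewrite | github.com/Keval78/Programming_Solutions | Hackerearth/August Circuits '23/BitwiseBizarro.py | or_count
-- ===== SOURCE A (Python) =====
-- from collections import Counter, defaultdict, deque
--
-- def or_count(n, arr):
--     results = {}
--     ors, nextOrs = {}, {}
--     ans = 0
--
--     for i in range(n):
--         nextOrs.clear()
--         for p, count in ors.items():
--             next_or = p | arr[i]
--             nextOrs[next_or] = nextOrs.get(next_or, 0) + count
--         nextOrs[arr[i]] = nextOrs.get(arr[i], 0) + 1
--         ors, nextOrs = nextOrs, ors
--
--         for p, count in ors.items():
--             bits = Counter(bin(p))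
--             if '1' in bits and bits['1'] % 2 == 1:
--                 ans += count
--     return ans
-- ===== SOURCE B (Python) =====
-- def or_count(n, arr):
--     ans = 0
--     for i in range(n):
--         cur = 0
--         for j in range(i, n):
--             cur |= arr[j]
--             if bin(cur).count('1') % 2 == 1:
--                 ans += 1
--     return ans
-- ===== Notes on version B (the rewrite author's own statement) =====
-- stated objective: simpler
-- what changed: Replaces A's per-ending-index dict of distinct OR values with multiplicities (plus the Counter-based bit test) by a plain nested scan: for each start index keep a running OR over growing subarrays and count odd popcounts directly.
import Mathlib
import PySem

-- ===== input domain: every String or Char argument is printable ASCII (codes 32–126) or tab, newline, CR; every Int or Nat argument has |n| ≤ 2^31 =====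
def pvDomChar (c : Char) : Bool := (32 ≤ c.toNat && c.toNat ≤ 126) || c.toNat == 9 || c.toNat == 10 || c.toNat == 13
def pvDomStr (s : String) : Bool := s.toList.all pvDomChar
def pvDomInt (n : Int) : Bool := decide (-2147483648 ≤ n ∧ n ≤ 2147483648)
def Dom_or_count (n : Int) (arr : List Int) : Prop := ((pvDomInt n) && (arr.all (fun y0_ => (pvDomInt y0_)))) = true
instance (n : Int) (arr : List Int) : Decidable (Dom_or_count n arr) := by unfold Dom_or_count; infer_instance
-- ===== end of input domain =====

-- B replaces A's per-end-index dict of distinct OR values (with multiplicities) by a plain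
-- nested scan of all subarrays maintaining a running OR per start index — simpler, no dict.

-- ===== PORT A =====
-- A's parity check: bits = Counter(bin(p)); '1' in bits and bits['1'] % 2 == 1
def pvCheckA (p : Int) : Bool :=
  let bits := PySem.Dict.counter (PySem.Int.pyBin p).toList
  bits.contains '1' && (PySem.Int.mod (bits.getD '1' 0) 2 == 1)

def or_count (n : Int) (arr : List Int) : Int :=
  ((PySem.List.pyRange 0 n 1).foldl (fun st i =>
    let a := PySem.List.pyGetD arr i 0
    let nextOrs := st.1.items.foldl (fun nd pc =>
      nd.insert (PySem.Int.bor pc.1 a) (nd.getD (PySem.Int.bor pc.1 a) 0 + pc.2))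
      (PySem.Dict.empty)
    let ors := nextOrs.insert a (nextOrs.getD a 0 + 1)
    let ans := ors.items.foldl (fun ans pc => if pvCheckA pc.1 then ans + pc.2 else ans) st.2
    (ors, ans)) ((PySem.Dict.empty : PySem.Dict Int Int), (0 : Int))).2

-- ===== PORT B =====
-- B's parity check: bin(cur).count('1') % 2 == 1 (single-char pattern: substring count = char count; exact)
def pvOddB (c : Int) : Bool := ((PySem.Int.pyBin c).toList.count '1') % 2 == 1

def or_count_alt (n : Int) (arr : List Int) : Int :=
  (PySem.List.pyRange 0 n 1).foldl (fun ans i =>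
    ((PySem.List.pyRange i n 1).foldl (fun st j =>
      let cur := PySem.Int.bor st.1 (PySem.List.pyGetD arr j 0)
      (cur, if pvOddB cur then st.2 + 1 else st.2)) ((0 : Int), ans)).2) 0

-- ===== PRECONDITION & SPEC =====
-- Python A indexes arr[i] for i in range(n): it raises IndexError when n > len(arr); Pre_ excludes exactly that.
def Pre_or_count (n : Int) (arr : List Int) : Prop := n ≤ (arr.length : Int)
instance (n : Int) (arr : List Int) : Decidable (Pre_or_count n arr) := by unfold Pre_or_count; infer_instance
def pvWitness_or_count : Int × List Int := (2, [1, 2])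

def Spec_or_count (n : Int) (arr : List Int) (out : Int) : Prop := out = or_count_alt n arr
instance (n : Int) (arr : List Int) (out : Int) : Decidable (Spec_or_count n arr out) := by unfold Spec_or_count; infer_instance

-- ===== CLAIM (what is proved, stated in full; the proofs are below) =====
def Claim_equal_or_count : Prop := ∀ (n : Int) (arr : List Int), Dom_or_count n arr → Pre_or_count n arr → Spec_or_count n arr (or_count n arr)

-- ===== LEMMAS AND PROOFS =====

-- element, segment OR (over indices [s, t)), and per-end multiset of ORs
def pvG (arr : List Int) (t : Nat) : Int := PySem.List.pyGetD arr (t : Int) 0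
def pvSeg (arr : List Int) (s t : Nat) : Int :=
  (((List.range t).drop s).map (pvG arr)).foldl PySem.Int.bor 0
def pvM (arr : List Int) (t : Nat) : List Int := (List.range t).map (fun s => pvSeg arr s t)
def pvInd (arr : List Int) (s e : Nat) : Int := if pvOddB (pvSeg arr s (e + 1)) then 1 else 0

def pvStepA (arr : List Int) (st : PySem.Dict Int Int × Int) (i : Int) : PySem.Dict Int Int × Int :=
  let a := PySem.List.pyGetD arr i 0
  let nextOrs := st.1.items.foldl (fun nd pc =>
    nd.insert (PySem.Int.bor pc.1 a) (nd.getD (PySem.Int.bor pc.1 a) 0 + pc.2))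
    (PySem.Dict.empty)
  let ors := nextOrs.insert a (nextOrs.getD a 0 + 1)
  let ans := ors.items.foldl (fun ans pc => if pvCheckA pc.1 then ans + pc.2 else ans) st.2
  (ors, ans)

def pvStepB (arr : List Int) (st : Int × Int) (j : Int) : Int × Int :=
  let cur := PySem.Int.bor st.1 (PySem.List.pyGetD arr j 0)
  (cur, if pvOddB cur then st.2 + 1 else st.2)

-- the invariant A's dict satisfies after t steps: a counter of pvM arr t
def pvInv (arr : List Int) (t : Nat) (d : PySem.Dict Int Int) : Prop :=
  d.keys.Nodup ∧ (∀ v, d.getD v 0 = ((pvM arr t).count v : Int)) ∧ (∀ x ∈ pvM arr t, x ∈ d.keys)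

theorem pvCheckA_eq (p : Int) : pvCheckA p = pvOddB p := by
  unfold pvCheckA pvOddB
  simp only [PySem.Dict.contains_counter, PySem.Dict.getD_counter]
  rw [PySem.Int.mod_eq_emod_of_pos (by norm_num)]
  by_cases hm : '1' ∈ (PySem.Int.pyBin p).toList
  · rw [Bool.eq_iff_iff]
    rw [PySem.Int.toList_pyBin] at hm
    simp [hm, beq_iff_eq]
    omega
  · rw [List.count_eq_zero.mpr hm]
    simp

theorem pvSeg_self (arr : List Int) (s : Nat) : pvSeg arr s s = 0 := by
  simp [pvSeg, List.drop_of_length_le]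

theorem pvSeg_succ (arr : List Int) (s t : Nat) (h : s ≤ t) :
    pvSeg arr s (t + 1) = PySem.Int.bor (pvSeg arr s t) (pvG arr t) := by
  unfold pvSeg
  rw [List.range_succ, List.drop_append_of_le_length (by simpa using h), List.map_append,
    List.foldl_append]
  rfl

theorem pvM_succ (arr : List Int) (t : Nat) :
    pvM arr (t + 1) = (pvM arr t).map (fun v => PySem.Int.bor v (pvG arr t)) ++ [pvG arr t] := by
  unfold pvM
  rw [List.range_succ, List.map_append, List.map_map]
  congr 1
  · exact List.map_congr_left fun s hs =>
      pvSeg_succ arr s t (Nat.le_of_lt (List.mem_range.mp hs))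
  · simp [pvSeg_succ arr t t le_rfl, pvSeg_self, PySem.Int.bor_comm]

-- weighted counting fold
theorem pvFoldIns (f : Int → Int) (ps : List (Int × Int)) (nd0 : PySem.Dict Int Int) (v : Int) :
    (ps.foldl (fun nd pc => nd.insert (f pc.1) (nd.getD (f pc.1) 0 + pc.2)) nd0).getD v 0
      = nd0.getD v 0 + ((ps.filter (fun pc => f pc.1 == v)).map (fun pc => pc.2)).sum := by
  induction ps generalizing nd0 with
  | nil => simp
  | cons q ps ih =>
    simp only [List.foldl_cons, List.filter_cons]
    rw [ih, PySem.Dict.getD_insert]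
    by_cases h : v = f q.1
    · subst h
      simp
      ring
    · have h2 : (f q.1 == v) = false := by
        simp only [beq_eq_false_iff_ne, ne_eq]
        exact fun e => h e.symm
      simp [h, h2]

-- summing counts of L over the distinct keys K that satisfy p is countP p L
theorem pvSumFilter (p : Int → Bool) (K L : List Int) (hnd : K.Nodup) (hsub : ∀ x ∈ L, x ∈ K) :
    ((K.filter p).map (fun k => (L.count k : Int))).sum = (L.countP p : Int) := by
  induction L with
  | nil => simp
  | cons x L ih =>
    have hx : x ∈ K := hsub x List.mem_cons_self
    have ih' := ih (fun y hy => hsub y (List.mem_cons_of_mem _ hy))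
    have hmap : ((K.filter p).map (fun k => (((x :: L).count k : Nat) : Int)))
        = ((K.filter p).map (fun k => ((L.count k : Nat) : Int) + (if k == x then (1 : Int) else 0))) := by
      refine List.map_congr_left fun k _ => ?_
      rw [List.count_cons]
      push_cast
      by_cases hk : k = x
      · simp [hk]
      · simp [hk]
        omega
    rw [hmap, PySem.List.sum_map_add_int, ih']
    have hone : ((K.filter p).map (fun k => (if k == x then (1 : Int) else 0))).sum
        = if p x then (1 : Int) else 0 := by
      rw [PySem.List.sum_map_ite_one_zero]
      by_cases hpx : p x = true
      · have hmem : x ∈ K.filter p := List.mem_filter.mpr ⟨hx, hpx⟩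
        have : (K.filter p).count x = 1 := List.count_eq_one_of_mem (hnd.filter p) hmem
        simp only [List.count] at this
        simp [hpx, this]
      · have hmem : x ∉ K.filter p := fun hc => hpx (List.mem_filter.mp hc).2
        have : (K.filter p).count x = 0 := List.count_eq_zero_of_not_mem hmem
        simp only [List.count] at this
        simp [hpx, this]
    rw [hone, List.countP_cons]
    by_cases hpx : p x = true <;> simp [hpx]

theorem pvItemsSum (p : Int → Bool) (d : PySem.Dict Int Int) (L : List Int)
    (hnd : d.keys.Nodup) (hcnt : ∀ v, d.getD v 0 = (L.count v : Int)) (hsub : ∀ x ∈ L, x ∈ d.keys) :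
    ((d.items.filter (fun pc => p pc.1)).map (fun pc => pc.2)).sum = (L.countP p : Int) := by
  rw [PySem.Dict.items_eq_map_keys d hnd 0, List.filter_map, List.map_map]
  have := pvSumFilter p d.keys L hnd hsub
  simpa [Function.comp_def, hcnt] using this

theorem pvCountMap (f : Int → Int) (l : List Int) (v : Int) :
    (l.map f).count v = l.countP (fun x => f x == v) := by
  induction l with
  | nil => simp
  | cons x l ih =>
    by_cases hx : f x = v
    · simp [ih, hx]
    · have hx' : ¬ v = f x := fun h => hx h.symm
      simp [ih, hx]

theorem pvA_step (arr : List Int) (t : Nat) (st : PySem.Dict Int Int × Int)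
    (h : pvInv arr t st.1) :
    pvInv arr (t + 1) (pvStepA arr st (t : Int)).1 ∧
      (pvStepA arr st (t : Int)).2 = st.2 + ((pvM arr (t + 1)).countP pvOddB : Int) := by
  obtain ⟨d, ans⟩ := st
  obtain ⟨hnd, hcnt, hsub⟩ := h
  set g := pvG arr t with hgdef
  set nd := d.items.foldl (fun nd pc =>
      nd.insert (PySem.Int.bor pc.1 g) (nd.getD (PySem.Int.bor pc.1 g) 0 + pc.2))
    (PySem.Dict.empty : PySem.Dict Int Int) with hndd
  set d' := nd.insert g (nd.getD g 0 + 1) with hd'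
  have hstep : pvStepA arr (d, ans) ((t : Nat) : Int)
      = (d', d'.items.foldl (fun ans pc => if pvCheckA pc.1 then ans + pc.2 else ans) ans) := rfl
  have hndcnt : ∀ v, nd.getD v 0 = (((pvM arr t).map (fun x => PySem.Int.bor x g)).count v : Int) := by
    intro v
    have hfold := pvFoldIns (fun x => PySem.Int.bor x g) d.items PySem.Dict.empty v
    rw [hndd, hfold, PySem.Dict.getD_empty]
    have hsum := pvItemsSum (fun x => PySem.Int.bor x g == v) d (pvM arr t) hnd hcnt hsub
    rw [hsum, zero_add, pvCountMap]
  have hcnt' : ∀ v, d'.getD v 0 = ((pvM arr (t + 1)).count v : Int) := by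
    intro v
    rw [hd', PySem.Dict.getD_insert, pvM_succ, List.count_append]
    have hone : List.count v [g] = if v = g then 1 else 0 := by
      by_cases hv : v = g
      · simp [hv]
      · rw [if_neg hv]
        exact List.count_eq_zero.mpr (by simp [hv])
    rw [hone]
    by_cases hv : v = g
    · rw [if_pos hv, if_pos hv, hndcnt]
      subst hv
      push_cast
      ring
    · rw [if_neg hv, if_neg hv, hndcnt]
      push_cast
      ring
  have hnd1 : nd.keys.Nodup := by
    rw [hndd]
    exact PySem.Dict.nodup_keys_foldl_insert_key _ _ _ _ (by simp)
  have hnd' : d'.keys.Nodup := by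
    rw [hd']
    exact PySem.Dict.nodup_keys_insert nd g _ hnd1
  have hkeys : ∀ y ∈ d.keys, PySem.Int.bor y g ∈ nd.keys := by
    intro y hy
    rw [hndd, PySem.Dict.keys_foldl_insert_key, PySem.Dict.keys_empty,
      PySem.Set.update_nil_left, PySem.Set.mem_ofList]
    simp only [PySem.Dict.keys] at hy
    obtain ⟨pc, hpc, hpc1⟩ := List.mem_map.mp hy
    exact List.mem_map.mpr ⟨pc, hpc, by rw [hpc1]⟩
  have hsub' : ∀ x ∈ pvM arr (t + 1), x ∈ d'.keys := by
    intro x hx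
    rw [pvM_succ] at hx
    rw [hd']
    rcases List.mem_append.mp hx with hx | hx
    · obtain ⟨y, hy, rfl⟩ := List.mem_map.mp hx
      exact (PySem.Dict.mem_keys_insert _ _ _ _).mpr (Or.inr (hkeys y (hsub y hy)))
    · rw [List.mem_singleton] at hx
      exact (PySem.Dict.mem_keys_insert _ _ _ _).mpr (Or.inl hx)
  have hans : d'.items.foldl (fun ans pc => if pvCheckA pc.1 then ans + pc.2 else ans) ans
      = ans + ((pvM arr (t + 1)).countP pvOddB : Int) := by
    rw [PySem.List.foldl_congr_mem d'.items _
        (fun ans (pc : Int × Int) => if pvOddB pc.1 then ans + pc.2 else ans) ans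
        (fun acc pc _ => by rw [pvCheckA_eq])]
    rw [PySem.List.foldl_if_eq_foldl_filter (fun pc : Int × Int => pvOddB pc.1)
        (fun acc pc => acc + pc.2)]
    rw [PySem.List.foldl_add _ (fun pc : Int × Int => pc.2) ans]
    rw [pvItemsSum pvOddB d' (pvM arr (t + 1)) hnd' hcnt' hsub']
  rw [hstep]
  exact ⟨⟨hnd', hcnt', hsub'⟩, hans⟩

def pvIdx (m : Nat) : List Int := (List.range m).map (fun k : Nat => (Nat.cast k : Int))

theorem pvIdx_succ (m : Nat) : pvIdx (m + 1) = pvIdx m ++ [((m : Nat) : Int)] := by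
  simp [pvIdx, List.range_succ]

theorem pvA_loop (arr : List Int) (m : Nat) :
    pvInv arr m ((pvIdx m).foldl (pvStepA arr) (PySem.Dict.empty, 0)).1 ∧
      ((pvIdx m).foldl (pvStepA arr) (PySem.Dict.empty, 0)).2
        = ((List.range m).map (fun e => ((pvM arr (e + 1)).countP pvOddB : Int))).sum := by
  induction m with
  | zero =>
    refine ⟨⟨?_, ?_, ?_⟩, ?_⟩ <;>
      simp [pvIdx, pvM, PySem.Dict.getD_empty, PySem.Dict.keys_empty]
  | succ m ih =>
    rw [pvIdx_succ, List.foldl_append]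
    simp only [List.foldl_cons, List.foldl_nil]
    obtain ⟨hInv, hAns⟩ := ih
    have hstep := pvA_step arr m
      ((pvIdx m).foldl (pvStepA arr) (PySem.Dict.empty, 0)) hInv
    refine ⟨hstep.1, ?_⟩
    rw [hstep.2, hAns, List.range_succ, List.map_append, List.sum_append]
    simp

theorem pvB_inner (arr : List Int) (s d : Nat) (ans0 : Int) :
    (PySem.List.pyRange (s : Int) ((s + d : Nat) : Int) 1).foldl (pvStepB arr) (0, ans0)
      = (pvSeg arr s (s + d), ans0 + ((List.range d).map (fun k => pvInd arr s (s + k))).sum) := by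
  induction d with
  | zero =>
    rw [Nat.add_zero, PySem.List.pyRange_one_eq_nil le_rfl, List.foldl_nil, pvSeg_self]
    simp
  | succ k ih =>
    have hcast : ((s + (k + 1) : Nat) : Int) = ((s + k : Nat) : Int) + 1 := by push_cast; ring
    rw [hcast, PySem.List.pyRange_one_succ_right (by omega), List.foldl_append, ih]
    simp only [List.foldl_cons, List.foldl_nil]
    have hseg : PySem.Int.bor (pvSeg arr s (s + k)) (PySem.List.pyGetD arr ((s + k : Nat) : Int) 0)
        = pvSeg arr s (s + k + 1) := (pvSeg_succ arr s (s + k) (Nat.le_add_right s k)).symm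
    unfold pvStepB
    simp only []
    rw [hseg]
    rw [List.range_succ, List.map_append, List.sum_append]
    have : s + (k + 1) = s + k + 1 := rfl
    rw [this]
    by_cases h : pvOddB (pvSeg arr s (s + k + 1))
    · simp [pvInd, h]
      ring
    · simp [pvInd, h]

theorem pvListSum (n : Nat) (f : Nat → Int) :
    ((List.range n).map f).sum = ∑ i ∈ Finset.range n, f i := by
  induction n with
  | zero => simp
  | succ k ih => rw [List.range_succ, Finset.sum_range_succ]; simp [ih]

theorem pvSwap (arr : List Int) (m : Nat) :
    ((List.range m).map (fun e => ((pvM arr (e + 1)).countP pvOddB : Int))).sum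
      = ((List.range m).map (fun s => ((List.range (m - s)).map (fun k => pvInd arr s (s + k))).sum)).sum := by
  have hrow : ∀ e : Nat, ((pvM arr (e + 1)).countP pvOddB : Int)
      = ∑ x ∈ Finset.range (e + 1), pvInd arr x e := by
    intro e
    have h1 : (pvM arr (e + 1)).countP pvOddB
        = (List.range (e + 1)).countP (fun x => pvOddB (pvSeg arr x (e + 1))) := by
      unfold pvM
      rw [List.countP_map]
      rfl
    rw [h1, ← PySem.List.sum_map_ite_one_zero, pvListSum]
    rfl
  rw [pvListSum, pvListSum]
  calc (∑ e ∈ Finset.range m, ((pvM arr (e + 1)).countP pvOddB : Int))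
      = ∑ e ∈ Finset.range m, ∑ x ∈ Finset.range (e + 1), pvInd arr x e := by
        exact Finset.sum_congr rfl fun e _ => hrow e
    _ = ∑ e ∈ Finset.Ico 0 m, ∑ x ∈ Finset.Ico 0 (e + 1), pvInd arr x e := by
        rw [Finset.range_eq_Ico]
    _ = ∑ x ∈ Finset.Ico 0 m, ∑ e ∈ Finset.Ico x m, pvInd arr x e := by
        rw [Finset.sum_Ico_Ico_comm]
    _ = ∑ x ∈ Finset.range m, ((List.range (m - x)).map (fun k => pvInd arr x (x + k))).sum := by
        refine Finset.sum_congr (by rw [Finset.range_eq_Ico]) fun x _ => ?_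
        rw [Finset.sum_Ico_eq_sum_range, pvListSum]

theorem pvA_eq (n : Int) (arr : List Int) :
    or_count n arr = ((List.range n.toNat).map (fun e => ((pvM arr (e + 1)).countP pvOddB : Int))).sum := by
  have h0 : or_count n arr
      = ((PySem.List.pyRange 0 n 1).foldl (pvStepA arr) (PySem.Dict.empty, 0)).2 := rfl
  rw [h0, PySem.List.pyRange_one]
  have h1 : (List.range (n - 0).toNat).map (fun k : Nat => (0 : Int) + k) = pvIdx n.toNat := by
    simp [pvIdx]
  rw [h1]
  exact (pvA_loop arr n.toNat).2

set_option maxHeartbeats 1000000 in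
theorem pvB_eq (n : Int) (arr : List Int) :
    or_count_alt n arr
      = ((List.range n.toNat).map (fun s => ((List.range (n.toNat - s)).map (fun k => pvInd arr s (s + k))).sum)).sum := by
  have h0 : or_count_alt n arr
      = (PySem.List.pyRange 0 n 1).foldl (fun ans i =>
          ((PySem.List.pyRange i n 1).foldl (pvStepB arr) (0, ans)).2) 0 := rfl
  by_cases hn : 0 ≤ n
  · have hm : ((n.toNat : Nat) : Int) = n := Int.toNat_of_nonneg hn
    rw [h0, PySem.List.pyRange_one]
    have h1 : (List.range (n - 0).toNat).map (fun k : Nat => (0 : Int) + k) = pvIdx n.toNat := by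
      simp [pvIdx]
    rw [h1]
    have hfun : ∀ (acc : Int), ∀ i ∈ pvIdx n.toNat,
        ((PySem.List.pyRange i n 1).foldl (pvStepB arr) (0, acc)).2
          = acc + ((List.range (n.toNat - i.toNat)).map
            (fun k => pvInd arr i.toNat (i.toNat + k))).sum := by
      intro acc i hi
      obtain ⟨s, hs, rfl⟩ := List.mem_map.mp hi
      have hsm : s ≤ n.toNat := Nat.le_of_lt (List.mem_range.mp hs)
      have hinner := pvB_inner arr s (n.toNat - s) acc
      rw [Nat.add_sub_cancel' hsm] at hinner
      have hn2 : ((n.toNat : Nat) : Int) = n := hm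
      rw [hn2] at hinner
      simp only [Int.toNat_natCast]
      rw [hinner]
    have hcong := PySem.List.foldl_congr_mem (pvIdx n.toNat)
        (fun ans i => ((PySem.List.pyRange i n 1).foldl (pvStepB arr) (0, ans)).2)
        (fun ans i => ans + ((List.range (n.toNat - i.toNat)).map
          (fun k => pvInd arr i.toNat (i.toNat + k))).sum) 0 hfun
    rw [hcong]
    rw [PySem.List.foldl_add, zero_add]
    unfold pvIdx
    rw [List.map_map]
    congr 1
  · have hneg : n < 0 := by omega
    have : n.toNat = 0 := by omega
    rw [h0, PySem.List.pyRange_one_eq_nil (by omega), this]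
    simp

-- ===== VERDICT (by name: the statement is the Claim_ definition above) =====
theorem or_count_spec : Claim_equal_or_count := by
  intro n arr _ _
  unfold Spec_or_count
  rw [pvA_eq, pvB_eq, pvSwap]
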